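-- pv_equiv track=rewrite | github.com/EdsonBPBR/Python-1periodo | thehuxley/desafios/estatisticas_notas.py | calcula_moda
-- ===== SOURCE A (Python) =====
-- def calcula_moda(numeros):
--     k = []
--     maior = 0
--     valor = 0
--     tem_moda = True
--     for posicao in range(len(numeros)):
--         if not(numeros[posicao] in k):
--             freq_atual = numeros.count(numeros[posicao])
--
--             if freq_atual > maior:
--                 maior = freq_atual
--                 valor = numeros[posicao]
--                 tem_moda = True
--             elif freq_atual == maior and numeros[posicao] != valor:
--                 tem_moda = False
--
--             k.append(numeros[posicao])
--     return tem_moda, maior, valor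
-- ===== SOURCE B (Python) =====
-- def calcula_moda(numeros):
--     if not numeros:
--         return True, 0, 0
--     freq = {}
--     for x in numeros:
--         freq[x] = freq.get(x, 0) + 1
--     maior = max(freq.values())
--     valor = next(x for x in numeros if freq[x] == maior)
--     tem_moda = sum(1 for f in freq.values() if f == maior) == 1
--     return tem_moda, maior, valor
-- ===== Notes on version B (the rewrite author's own statement) =====
-- stated objective: simpler
-- what changed: A's single running-max loop over unseen elements (with repeated numeros.count scans and an elif tie flag) is replaced by one frequency-table pass followed by three separate derived passes: max of the table's values, first element whose frequency equals that max, and a tie count of maximal frequencies.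
import Mathlib
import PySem

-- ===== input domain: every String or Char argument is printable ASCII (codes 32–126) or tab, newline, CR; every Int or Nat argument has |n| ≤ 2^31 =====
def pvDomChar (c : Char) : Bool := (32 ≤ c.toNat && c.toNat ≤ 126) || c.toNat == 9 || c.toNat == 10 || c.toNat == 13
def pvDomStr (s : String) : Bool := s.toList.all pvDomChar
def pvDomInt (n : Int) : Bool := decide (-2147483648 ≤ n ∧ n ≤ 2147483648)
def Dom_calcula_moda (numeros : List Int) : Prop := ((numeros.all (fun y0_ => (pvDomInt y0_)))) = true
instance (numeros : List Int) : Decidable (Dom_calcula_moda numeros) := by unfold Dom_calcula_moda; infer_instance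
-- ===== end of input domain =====

-- B replaces A's single running-max/elif loop by a frequency table plus separate max / first-match / tie-count passes (objective: simpler decomposition, and faster in Python by avoiding repeated list.count scans).

-- ===== PORT A =====
-- loop body of A's `for posicao in range(len(numeros))` (literal transliteration; state = (k, maior, valor, tem_moda))
def calculaModaBody (ns : List Int) (s : List Int × Int × Int × Bool) (x : Int) : List Int × Int × Int × Bool :=
  if !(s.1.contains x) then
    let freq_atual : Int := (PySem.List.count ns x : Int)
    if freq_atual > s.2.1 then (s.1 ++ [x], freq_atual, x, true)
    else if freq_atual == s.2.1 && x != s.2.2.1 then (s.1 ++ [x], s.2.1, s.2.2.1, false)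
    else (s.1 ++ [x], s.2.1, s.2.2.1, s.2.2.2)
  else s

def calcula_moda (numeros : List Int) : Bool × Int × Int :=
  let st := (PySem.List.pyRange 0 (numeros.length : Int)).foldl
    (fun s posicao => calculaModaBody numeros s (PySem.List.pyGetD numeros posicao 0))
    (([] : List Int), (0 : Int), (0 : Int), true)
  (st.2.2.2, st.2.1, st.2.2.1)

-- ===== PORT B =====
def calcula_moda_alt (numeros : List Int) : Bool × Int × Int :=
  if numeros = [] then (true, 0, 0)
  else
    let freq := numeros.foldl (fun d x => d.insert x (d.getD x 0 + 1)) (PySem.Dict.empty : PySem.Dict Int Int)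
    let maior := (PySem.List.max? freq.values (fun y => y)).getD 0
    let valor := (numeros.find? (fun x => freq.getD x 0 == maior)).getD 0
    let tem_moda := freq.values.countP (fun f => f == maior) == 1
    (tem_moda, maior, valor)

-- ===== PRECONDITION & SPEC =====
def Spec_calcula_moda (numeros : List Int) (out : Bool × Int × Int) : Prop := out = calcula_moda_alt numeros
instance (numeros : List Int) (out : Bool × Int × Int) : Decidable (Spec_calcula_moda numeros out) := by unfold Spec_calcula_moda; infer_instance

-- ===== CLAIM (what is proved, stated in full; the proofs are below) =====
def Claim_equal_calcula_moda : Prop := ∀ (numeros : List Int), Dom_calcula_moda numeros → Spec_calcula_moda numeros (calcula_moda numeros)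

-- ===== LEMMAS AND PROOFS =====

-- count of x in ns, as an Int
def cnt (ns : List Int) (x : Int) : Int := (ns.count x : Int)
-- characterisation of A's loop state after processing prefix p (counts taken in the full list ns)
def Mf (ns p : List Int) : Int := ((PySem.List.dedup p).map (cnt ns)).foldl max 0
def Vf (ns p : List Int) : Int := ((p.find? (fun x => cnt ns x == Mf ns p)).getD 0)
def Tf (ns p : List Int) : Bool := (p == []) || ((PySem.List.dedup p).countP (fun x => cnt ns x == Mf ns p) == 1)
def stOf (ns p : List Int) : List Int × Int × Int × Bool := (PySem.List.dedup p, Mf ns p, Vf ns p, Tf ns p)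

lemma dedup_append_singleton (p : List Int) (x : Int) :
    PySem.List.dedup (p ++ [x]) = if x ∈ p then PySem.List.dedup p else PySem.List.dedup p ++ [x] := by
  have h1 : PySem.List.dedup (p ++ [x]) = PySem.Set.add (PySem.List.dedup p) x := by
    simp [PySem.List.dedup, PySem.Set.ofList, List.foldl_append]
  rw [h1, PySem.Set.add]
  by_cases h : x ∈ p <;> simp [h]

lemma mem_dedup_iff (p : List Int) (y : Int) : y ∈ PySem.List.dedup p ↔ y ∈ p :=
  PySem.Set.mem_ofList p y

lemma le_Mf (ns p : List Int) (y : Int) (hy : y ∈ p) : cnt ns y ≤ Mf ns p := by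
  exact (PySem.List.le_foldl_max ((PySem.List.dedup p).map (cnt ns)) 0).2 (cnt ns y)
    (List.mem_map.mpr ⟨y, (mem_dedup_iff p y).mpr hy, rfl⟩)

lemma Mf_attained (ns p : List Int) (hp : p ≠ []) (h1 : ∀ y ∈ p, 1 ≤ cnt ns y) :
    ∃ y ∈ PySem.List.dedup p, cnt ns y = Mf ns p := by
  rcases PySem.List.foldl_max_mem ((PySem.List.dedup p).map (cnt ns)) 0 with h | h
  · exfalso
    obtain ⟨z, hz⟩ := List.exists_mem_of_ne_nil p hp
    have hle := le_Mf ns p z hz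
    have := h1 z hz
    have h0 : Mf ns p = 0 := h
    omega
  · obtain ⟨y, hy, hcy⟩ := List.mem_map.mp h
    exact ⟨y, hy, hcy⟩

lemma Mf_append (ns p : List Int) (x : Int) (hx : x ∉ p) :
    Mf ns (p ++ [x]) = max (Mf ns p) (cnt ns x) := by
  unfold Mf
  rw [dedup_append_singleton, if_neg hx, List.map_append, List.foldl_append]
  simp

lemma Mf_nil (ns : List Int) : Mf ns [] = 0 := rfl

lemma Mf_pos_ne_nil (ns p : List Int) (h : 0 < Mf ns p) : p ≠ [] := by
  intro hp; rw [hp, Mf_nil] at h; omega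

lemma Mf_append_mem (ns p : List Int) (x : Int) (hx : x ∈ p) : Mf ns (p ++ [x]) = Mf ns p := by
  unfold Mf; rw [dedup_append_singleton, if_pos hx]

lemma find?_Mf_some (ns p : List Int) (hp : p ≠ []) (h1 : ∀ y ∈ p, 1 ≤ cnt ns y) :
    ∃ a, p.find? (fun z => cnt ns z == Mf ns p) = some a := by
  obtain ⟨y, hy, hcy⟩ := Mf_attained ns p hp h1
  exact Option.isSome_iff_exists.mp
    (List.find?_isSome.mpr ⟨y, (mem_dedup_iff p y).mp hy, by simp [hcy]⟩)

lemma Vf_append_stable (ns p : List Int) (x : Int) (hp : p ≠ []) (h1 : ∀ y ∈ p, 1 ≤ cnt ns y)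
    (hM : Mf ns (p ++ [x]) = Mf ns p) : Vf ns (p ++ [x]) = Vf ns p := by
  unfold Vf
  rw [hM, List.find?_append]
  obtain ⟨a, ha⟩ := find?_Mf_some ns p hp h1
  rw [ha, Option.some_or]

lemma step_eq (ns p : List Int) (x : Int) (hx : 1 ≤ cnt ns x) (hp : ∀ y ∈ p, 1 ≤ cnt ns y) :
    calculaModaBody ns (stOf ns p) x = stOf ns (p ++ [x]) := by
  have hcnt : (PySem.List.count ns x : Int) = cnt ns x := by
    rw [PySem.List.count_eq]; rfl
  by_cases hmem : x ∈ p
  · have hpne : p ≠ [] := List.ne_nil_of_mem hmem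
    have hM := Mf_append_mem ns p x hmem
    have hV := Vf_append_stable ns p x hpne hp hM
    have hd : PySem.List.dedup (p ++ [x]) = PySem.List.dedup p := by
      rw [dedup_append_singleton, if_pos hmem]
    have hT : Tf ns (p ++ [x]) = Tf ns p := by
      unfold Tf
      rw [hd, hM, beq_eq_false_iff_ne.mpr (List.append_ne_nil_of_right_ne_nil p (by simp)),
        beq_eq_false_iff_ne.mpr hpne]
    have hc : (PySem.List.dedup p).contains x = true :=
      List.contains_iff_mem.mpr ((mem_dedup_iff p x).mpr hmem)
    unfold calculaModaBody stOf
    simp only [hc, Bool.not_true, Bool.false_eq_true, if_false, hd, hM, hV, hT]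
  · have hc : (PySem.List.dedup p).contains x = false := by
      rw [Bool.eq_false_iff, Ne, List.contains_iff_mem, mem_dedup_iff]
      exact hmem
    have hd : PySem.List.dedup (p ++ [x]) = PySem.List.dedup p ++ [x] := by
      rw [dedup_append_singleton, if_neg hmem]
    have hMx : Mf ns (p ++ [x]) = max (Mf ns p) (cnt ns x) := Mf_append ns p x hmem
    rcases lt_trichotomy (Mf ns p) (cnt ns x) with hlt | heq | hgt
    · -- freq_atual > maior
      have hM : Mf ns (p ++ [x]) = cnt ns x := by rw [hMx]; omega
      have hV : Vf ns (p ++ [x]) = x := by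
        unfold Vf
        rw [hM, List.find?_append]
        have hnone : p.find? (fun z => cnt ns z == cnt ns x) = none :=
          List.find?_eq_none.mpr (fun y hy => by
            have := le_Mf ns p y hy; simp; omega)
        rw [hnone]
        simp
      have hT : Tf ns (p ++ [x]) = true := by
        unfold Tf
        rw [hd, hM, List.countP_append]
        have h0 : (PySem.List.dedup p).countP (fun z => cnt ns z == cnt ns x) = 0 :=
          List.countP_eq_zero.mpr (fun y hy => by
            have := le_Mf ns p y ((mem_dedup_iff p y).mp hy); simp; omega)
        rw [h0]
        simp
      unfold calculaModaBody stOf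
      simp only [hc, Bool.not_false, if_true, hcnt]
      rw [if_pos hlt, hd, hM, hV, hT]
    · -- freq_atual == maior, x != valor
      have hpne : p ≠ [] := Mf_pos_ne_nil ns p (by omega)
      have hM : Mf ns (p ++ [x]) = Mf ns p := by rw [hMx]; omega
      have hV := Vf_append_stable ns p x hpne hp hM
      obtain ⟨a, ha⟩ := find?_Mf_some ns p hpne hp
      have hax : a ∈ p := List.mem_of_find?_eq_some ha
      have hxa : x ≠ a := fun hh => hmem (hh ▸ hax)
      have hVp : Vf ns p = a := by unfold Vf; rw [ha]; rfl
      have hT : Tf ns (p ++ [x]) = false := by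
        unfold Tf
        rw [hd, hM, List.countP_append]
        have hpos : (PySem.List.dedup p).countP (fun z => cnt ns z == Mf ns p) ≠ 0 := by
          rw [Ne, List.countP_eq_zero]
          push Not
          obtain ⟨y, hy, hcy⟩ := Mf_attained ns p hpne hp
          exact ⟨y, hy, by simp [hcy]⟩
        have h1x : List.countP (fun z => cnt ns z == Mf ns p) [x] = 1 := by simp [heq]
        rw [h1x, beq_eq_false_iff_ne.mpr (List.append_ne_nil_of_right_ne_nil p (by simp)),
          Bool.false_or, beq_eq_false_iff_ne]
        omega
      unfold calculaModaBody stOf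
      simp only [hc, Bool.not_false, if_true, hcnt]
      rw [if_neg (by omega), if_pos (by simp [heq, hVp, hxa]), hd, hM, hV, hT]
    · -- freq_atual < maior
      have hpne : p ≠ [] := Mf_pos_ne_nil ns p (by omega)
      have hM : Mf ns (p ++ [x]) = Mf ns p := by rw [hMx]; omega
      have hV := Vf_append_stable ns p x hpne hp hM
      have hT : Tf ns (p ++ [x]) = Tf ns p := by
        unfold Tf
        rw [hd, hM, List.countP_append]
        have h0 : List.countP (fun z => cnt ns z == Mf ns p) [x] = 0 := by simp; omega
        rw [h0, beq_eq_false_iff_ne.mpr (List.append_ne_nil_of_right_ne_nil p (by simp)),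
          beq_eq_false_iff_ne.mpr hpne, Nat.add_zero]
      unfold calculaModaBody stOf
      simp only [hc, Bool.not_false, if_true, hcnt]
      rw [if_neg (by omega), if_neg (by simp; omega), hd, hM, hV, hT]

lemma foldA (ns : List Int) : ∀ (l p : List Int), (∀ y ∈ p, 1 ≤ cnt ns y) → (∀ y ∈ l, 1 ≤ cnt ns y) →
    l.foldl (calculaModaBody ns) (stOf ns p) = stOf ns (p ++ l) := by
  intro l
  induction l with
  | nil => intro p _ _; simp
  | cons x t ih =>
    intro p hp hl
    have h1 : calculaModaBody ns (stOf ns p) x = stOf ns (p ++ [x]) :=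
      step_eq ns p x (hl x (by simp)) hp
    have h2 := ih (p ++ [x])
      (by
        intro y hy
        rcases List.mem_append.mp hy with hmem | hmem
        · exact hp y hmem
        · have : y = x := by simpa using hmem
          subst this; exact hl y (by simp))
      (fun y hy => hl y (by simp [hy]))
    simp only [List.foldl_cons, h1, h2, List.append_assoc, List.singleton_append]

lemma counts_pos (ns : List Int) : ∀ y ∈ ns, 1 ≤ cnt ns y := by
  intro y hy
  have := List.count_pos_iff.mpr hy
  unfold cnt
  omega

lemma portA_eq (ns : List Int) : calcula_moda ns = (Tf ns ns, Mf ns ns, Vf ns ns) := by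
  have hfold : List.foldl (calculaModaBody ns) (stOf ns []) ns = stOf ns ns :=
    foldA ns ns [] (by simp) (counts_pos ns)
  unfold calcula_moda
  rw [PySem.List.foldl_pyRange_pyGetD' ns 0 (calculaModaBody ns) _ le_rfl]
  simp only [Int.toNat_zero, List.drop_zero]
  rw [show (([] : List Int), (0 : Int), (0 : Int), true) = stOf ns [] from rfl, hfold]
  rfl

lemma values_counter_eq (ns : List Int) :
    (PySem.Dict.counter ns).values = (PySem.List.dedup ns).map (cnt ns) := by
  unfold PySem.Dict.values
  rw [PySem.Dict.items_counter, List.map_map]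
  rfl

lemma portB_eq (ns : List Int) (h : ns ≠ []) : calcula_moda_alt ns = (Tf ns ns, Mf ns ns, Vf ns ns) := by
  unfold calcula_moda_alt
  rw [if_neg h]
  simp only [PySem.Dict.foldl_insert_getD_add_one_eq_counter, values_counter_eq,
    PySem.Dict.getD_counter]
  -- the dedup list is nonempty
  obtain ⟨z, hz⟩ := List.exists_mem_of_ne_nil ns h
  have hzd : z ∈ PySem.List.dedup ns := (mem_dedup_iff ns z).mpr hz
  obtain ⟨y, t, hyt⟩ := List.exists_cons_of_ne_nil (List.ne_nil_of_mem hzd)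
  have hy1 : 1 ≤ cnt ns y := counts_pos ns y ((mem_dedup_iff ns y).mp (hyt ▸ List.mem_cons_self))
  have hmaior : (PySem.List.max? ((PySem.List.dedup ns).map (cnt ns)) fun y => y).getD 0 = Mf ns ns := by
    rw [hyt]
    unfold Mf
    rw [hyt, List.map_cons, PySem.List.max?_id_cons, Option.getD_some, List.foldl_cons,
      max_eq_right (by omega : (0 : Int) ≤ cnt ns y)]
  rw [hmaior]
  have hpred : (fun x => ((List.count x ns : Int) == Mf ns ns)) = (fun x => cnt ns x == Mf ns ns) := rfl
  rw [hpred]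
  have hT : ((((PySem.List.dedup ns).map (cnt ns)).countP fun f => f == Mf ns ns) == 1) = Tf ns ns := by
    unfold Tf
    rw [List.countP_map, beq_eq_false_iff_ne.mpr h, Bool.false_or]
    rfl
  rw [hT]
  rfl

-- ===== VERDICT (by name: the statement is the Claim_ definition above) =====
theorem calcula_moda_spec : Claim_equal_calcula_moda := by
  intro ns _
  unfold Spec_calcula_moda
  by_cases h : ns = []
  · subst h; decide
  · rw [portA_eq, portB_eq ns h]
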